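-- pv_equiv track=rewrite | github.com/thantrieu/Python2030 | net/braniumacademy/ex_chapter6/lesson63/ex6/Exercises6.py | is_reversible
-- ===== SOURCE A (Python) =====
-- def is_reversible(m):
--     """This function check whether or not n is reversible number"""
--     if m < 0:
--         m *= -1
--     x = m
--     r = 0
--     while m > 0:
--         r = r * 10 + m % 10
--         m //= 10
--     return r == x
-- ===== SOURCE B (Python) =====
-- def is_reversible(m):
--     """This function check whether or not n is reversible number"""
--     s = str(abs(m))
--     return s == s[::-1]
-- ===== Notes on version B (the rewrite author's own statement) =====
-- stated objective: simpler
-- what changed: Instead of arithmetically rebuilding the reversed integer digit by digit (r = r*10 + m%10) in a loop, B converts abs(m) to its decimal string once and decides reversibility as a single palindrome comparison s == s[::-1]; no loop is maintained.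
import Mathlib
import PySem

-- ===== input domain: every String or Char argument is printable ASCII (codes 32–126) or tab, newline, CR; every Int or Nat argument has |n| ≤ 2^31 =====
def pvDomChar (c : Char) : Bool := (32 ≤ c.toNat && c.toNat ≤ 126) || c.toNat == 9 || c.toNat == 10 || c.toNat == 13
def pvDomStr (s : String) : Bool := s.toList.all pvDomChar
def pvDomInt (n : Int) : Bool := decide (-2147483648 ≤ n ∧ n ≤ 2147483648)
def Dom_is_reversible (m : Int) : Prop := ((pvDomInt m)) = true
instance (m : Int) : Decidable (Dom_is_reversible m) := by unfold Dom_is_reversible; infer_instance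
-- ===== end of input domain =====

-- B replaces A's arithmetic rebuild of the reversed integer by converting abs(m) to its
-- decimal string and comparing it with its reverse (simpler: one conversion + one comparison).


-- ===== PORT A =====
-- the 'while m > 0: r = r*10 + m%10; m //= 10' loop, step for step
def pvLoopA (m r : Int) : Int :=
  if _h : m > 0 then pvLoopA (PySem.Int.floordiv m 10) (r * 10 + PySem.Int.mod m 10) else r
termination_by m.toNat
decreasing_by
  rw [PySem.Int.floordiv_eq_ediv_of_pos (by omega)]
  omega

def is_reversible (m : Int) : Bool :=
  let m1 := if m < 0 then m * (-1) else m
  -- x = m; r = 0; loop; return r == x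
  decide (pvLoopA m1 0 = m1)

-- ===== PORT B =====
-- Source B: s = str(abs(m)); return s == s[::-1]
def is_reversible_alt (m : Int) : Bool :=
  let s := PySem.Int.toStr |m|
  decide (some s = PySem.Str.slice? s none none (-1))

-- ===== PRECONDITION & SPEC =====
def Spec_is_reversible (m : Int) (out : Bool) : Prop := out = is_reversible_alt m
instance (m : Int) (out : Bool) : Decidable (Spec_is_reversible m out) := by unfold Spec_is_reversible; infer_instance

-- ===== CLAIM (what is proved, stated in full; the proofs are below) =====
def Claim_equal_is_reversible : Prop := ∀ (m : Int), Dom_is_reversible m → Spec_is_reversible m (is_reversible m)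

-- ===== LEMMAS AND PROOFS =====

-- A's loop computes the value of the reversed digit list (plus the shifted accumulator).
lemma pvLoopA_digits (N : Nat) : ∀ r : Int,
    pvLoopA (N : Int) r
      = r * 10 ^ (Nat.digits 10 N).length + ((Nat.ofDigits 10 (Nat.digits 10 N).reverse : Nat) : Int) := by
  induction N using Nat.strong_induction_on with
  | _ N ih =>
    intro r
    rcases Nat.eq_zero_or_pos N with h0 | hpos
    · subst h0; rw [pvLoopA]; simp
    · rw [pvLoopA]
      have hgt : (N : Int) > 0 := by exact_mod_cast hpos
      rw [dif_pos hgt]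
      have hfd : PySem.Int.floordiv (N : Int) 10 = ((N / 10 : Nat) : Int) := by
        exact_mod_cast PySem.Int.floordiv_natCast N 10
      have hmd : PySem.Int.mod (N : Int) 10 = ((N % 10 : Nat) : Int) := by
        exact_mod_cast PySem.Int.mod_natCast N 10
      rw [hfd, hmd, ih (N / 10) (Nat.div_lt_self hpos (by norm_num))]
      rw [Nat.digits_def' (by norm_num : (1:Nat) < 10) hpos]
      simp only [List.reverse_cons, List.length_cons, Nat.ofDigits_append, Nat.ofDigits_cons,
        Nat.ofDigits_nil, List.length_reverse]
      push_cast
      ring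

-- The crux on A's side: the reversed-digit value equals N exactly when the digit list is a palindrome.
lemma rev_value_eq_iff (N : Nat) :
    Nat.ofDigits 10 (Nat.digits 10 N).reverse = N ↔
      (Nat.digits 10 N).reverse = Nat.digits 10 N := by
  constructor
  · intro h
    rcases Nat.eq_zero_or_pos N with h0 | hpos
    · subst h0; simp
    · set L := Nat.digits 10 N with hL
      have hlt : ∀ d ∈ L.reverse, d < 10 := by
        intro d hd
        exact Nat.digits_lt_base (by norm_num) (List.mem_reverse.mp hd)
      have hLne : L ≠ [] := Nat.digits_ne_nil_iff_ne_zero.mpr (by omega)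
      by_cases hhead : N % 10 = 0
      · -- least-significant digit 0: the reversed value is too small to equal N
        exfalso
        have hLdef : L = N % 10 :: Nat.digits 10 (N / 10) :=
          Nat.digits_def' (by norm_num) hpos
        have hrev : L.reverse = (Nat.digits 10 (N / 10)).reverse ++ [0] := by
          rw [hLdef, hhead]; simp
        have hsmall : Nat.ofDigits 10 L.reverse < 10 ^ (L.length - 1) := by
          rw [hrev, Nat.ofDigits_append]
          have : Nat.ofDigits 10 ([0] : List Nat) = 0 := by simp [Nat.ofDigits]
          rw [this, Nat.mul_zero, Nat.add_zero]
          have hlen : (Nat.digits 10 (N / 10)).reverse.length = L.length - 1 := by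
            rw [hLdef]; simp
          calc Nat.ofDigits 10 (Nat.digits 10 (N / 10)).reverse
              < 10 ^ (Nat.digits 10 (N / 10)).reverse.length :=
                Nat.ofDigits_lt_base_pow_length (by norm_num)
                  (fun d hd => Nat.digits_lt_base (by norm_num) (List.mem_reverse.mp hd))
            _ = 10 ^ (L.length - 1) := by rw [hlen]
        have hbig : 10 ^ (L.length - 1) ≤ N := by
          have h1 := Nat.base_pow_length_digits_le 10 N (by norm_num) (by omega)
          have hlen1 : 1 ≤ L.length := List.length_pos_of_ne_nil hLne
          have : 10 ^ (L.length - 1) * 10 ≤ 10 * N := by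
            have : 10 ^ (L.length - 1) * 10 = 10 ^ L.length := by
              rw [← pow_succ]; congr 1; omega
            rw [this]; rw [← hL] at h1; omega
          omega
        omega
      · -- least-significant digit nonzero: digit lists are determined by their value
        have hlast : ∀ hne : L.reverse ≠ [], L.reverse.getLast hne ≠ 0 := by
          intro hne
          have hLdef : L = N % 10 :: Nat.digits 10 (N / 10) :=
            Nat.digits_def' (by norm_num) hpos
          have hrev : L.reverse = (Nat.digits 10 (N / 10)).reverse ++ [N % 10] := by
            rw [hLdef]; simp
          have hsome : L.reverse.getLast? = some (N % 10) := by rw [hrev]; simp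
          rw [List.getLast?_eq_some_getLast hne] at hsome
          rw [Option.some_inj.mp hsome]
          exact hhead
        have := Nat.digits_ofDigits 10 (by norm_num) L.reverse hlt hlast
        rw [h] at this
        rw [← hL] at this
        exact this.symm
  · intro h
    rw [h, Nat.ofDigits_digits]

-- B's side: core's decimal printer produces the digit characters, most significant first.
lemma toDigitsCore_eq (f : Nat) : ∀ (n : Nat) (acc : List Char), n < f →
    Nat.toDigitsCore 10 f n acc
      = (if n = 0 then ['0'] else ((Nat.digits 10 n).map Nat.digitChar).reverse) ++ acc := by
  induction f with
  | zero => intro n acc h; omega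
  | succ f ih =>
    intro n acc h
    rw [Nat.toDigitsCore]
    by_cases hdiv : n / 10 = 0
    · rw [if_pos hdiv]
      have hn10 : n < 10 := by omega
      by_cases hn0 : n = 0
      · subst hn0; simp [Nat.digitChar]
      · rw [if_neg hn0]
        have : Nat.digits 10 n = [n] := by
          rw [Nat.digits_def' (by norm_num : (1:Nat) < 10) (by omega), hdiv]
          simp [Nat.mod_eq_of_lt hn10]
        rw [this]
        simp [Nat.mod_eq_of_lt hn10]
    · rw [if_neg hdiv]
      have hnpos : 0 < n := by by_contra h0; simp [show n = 0 by omega] at hdiv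
      have hlt : n / 10 < f := by
        have := Nat.div_lt_self hnpos (by norm_num : 1 < 10)
        omega
      rw [ih (n / 10) _ hlt, if_neg hdiv]
      rw [Nat.digits_def' (by norm_num : (1:Nat) < 10) hnpos]
      rw [if_neg (by omega : ¬ n = 0)]
      simp

-- the reverse map: digitChar is injective on the digits 0..9
lemma digitChar_palindrome_iff (M : List Nat) (hlt : ∀ d ∈ M, d < 10) :
    ((M.map Nat.digitChar).reverse = M.map Nat.digitChar) ↔ (M.reverse = M) := by
  constructor
  · intro h
    have hg : ∀ d ∈ M, ((fun c : Char => c.toNat - 48) ∘ Nat.digitChar) d = d := by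
      intro d hd
      have := hlt d hd
      interval_cases d <;> decide
    have h2 : (M.map Nat.digitChar).reverse.map (fun c : Char => c.toNat - 48)
        = (M.map Nat.digitChar).map (fun c : Char => c.toNat - 48) := by rw [h]
    rw [← List.map_reverse, List.map_map, List.map_map] at h2
    have hrev : M.reverse.map ((fun c : Char => c.toNat - 48) ∘ Nat.digitChar) = M.reverse :=
      calc M.reverse.map ((fun c : Char => c.toNat - 48) ∘ Nat.digitChar)
          = M.reverse.map (fun d => d) :=
            List.map_congr_left (fun d hd => hg d (List.mem_reverse.mp hd))
        _ = M.reverse := by simp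
    have hid : M.map ((fun c : Char => c.toNat - 48) ∘ Nat.digitChar) = M :=
      calc M.map ((fun c : Char => c.toNat - 48) ∘ Nat.digitChar)
          = M.map (fun d => d) := List.map_congr_left hg
        _ = M := by simp
    rw [hrev, hid] at h2
    exact h2
  · intro h; rw [← List.map_reverse, h]

-- ===== VERDICT (by name: the statement is the Claim_ definition above) =====
theorem is_reversible_spec : Claim_equal_is_reversible := by
  intro m _
  simp only [Spec_is_reversible, is_reversible, is_reversible_alt]
  have habs : (if m < 0 then m * (-1) else m) = |m| := by
    rcases lt_or_ge m 0 with h | h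
    · rw [if_pos h, abs_of_neg h]; ring
    · rw [if_neg (not_lt.mpr h), abs_of_nonneg h]
  obtain ⟨N, hcast⟩ : ∃ N : Nat, |m| = (N : Int) := ⟨m.natAbs, by rw [Int.abs_eq_natAbs]⟩
  rw [habs, hcast]
  -- A side: value equality ↔ digit-list palindrome
  rw [pvLoopA_digits N 0]
  simp only [zero_mul, zero_add]
  -- B side: string equality ↔ same digit-list palindrome
  rw [PySem.Str.slice?_none_none_neg_one]
  have hchars : (PySem.Int.toStr (N : Int)).toList = Nat.toDigits 10 N := by
    rw [PySem.Int.toList_toStr, PySem.Int.toChars]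
    rw [if_neg (by omega : ¬ ((N : Int) < 0))]
    simp
  have hstr : (some (PySem.Int.toStr (N : Int))
        = some (String.ofList (PySem.Int.toStr (N : Int)).toList.reverse))
      ↔ ((Nat.toDigits 10 N).reverse = Nat.toDigits 10 N) := by
    rw [Option.some_inj]
    constructor
    · intro h
      have := congrArg String.toList h
      simp only [String.toList_ofList] at this
      rw [hchars] at this
      exact this.symm
    · intro h
      have h2 : (PySem.Int.toStr (N : Int)).toList.reverse = (PySem.Int.toStr (N : Int)).toList := by
        rw [hchars, h]
      rw [h2, String.ofList_toList]
  rw [decide_eq_decide, hstr, Int.natCast_inj, rev_value_eq_iff]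
  have htd : Nat.toDigits 10 N
      = (if N = 0 then ['0'] else ((Nat.digits 10 N).map Nat.digitChar).reverse) ++ [] :=
    toDigitsCore_eq (N + 1) N [] (by omega)
  rw [List.append_nil] at htd
  rcases Nat.eq_zero_or_pos N with h0 | hpos
  · subst h0; decide
  · rw [htd, if_neg (by omega), List.reverse_reverse]
    rw [show ((Nat.digits 10 N).map Nat.digitChar
          = ((Nat.digits 10 N).map Nat.digitChar).reverse)
        ↔ (((Nat.digits 10 N).map Nat.digitChar).reverse
          = (Nat.digits 10 N).map Nat.digitChar) from eq_comm]
    exact (digitChar_palindrome_iff (Nat.digits 10 N)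
      (fun d hd => Nat.digits_lt_base (by norm_num) hd)).symm
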